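-- pv_equiv track=rewrite | github.com/hanslhansl/rainbow-six-siege-weapon-statistics | generate_weapon_statistics_file.py | get_non_stagnant_intervals
-- ===== SOURCE A (Python) =====
-- def get_non_stagnant_intervals(data) -> tuple[tuple[int, int],...]:
--     intervals = []
--     start = None
--     for i in range(len(data) - 1):
--         if data[i] > data[i + 1]:
--             if start is None:
--                 start = i
--         else:
--             if start is not None:
--                 intervals.append((start, i))
--                 start = None
--     if start is not None:
--         intervals.append((start, len(data) - 1))
--     return tuple(intervals)
-- ===== SOURCE B (Python) =====
-- def get_non_stagnant_intervals(data) -> tuple[tuple[int, int], ...]: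
--     # Two-phase: collect descent indices, then group maximal consecutive runs.
--     descents = [i for i in range(len(data) - 1) if data[i] > data[i + 1]]
--     intervals = []
--     k, n = 0, len(descents)
--     while k < n:
--         j = k
--         while j + 1 < n and descents[j + 1] == descents[j] + 1:
--             j += 1
--         intervals.append((descents[k], descents[j] + 1))
--         k = j + 1
--     return tuple(intervals)
-- ===== Notes on version B (the rewrite author's own statement) =====
-- stated objective: alternative
-- what changed: Replaced A's stateful open/close scan (Optional start flag) with a two-phase build-then-group shape: collect all descent indices i with data[i]>data[i+1], then group maximal runs of consecutive indices into intervals (first, last+1).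
import Mathlib
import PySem

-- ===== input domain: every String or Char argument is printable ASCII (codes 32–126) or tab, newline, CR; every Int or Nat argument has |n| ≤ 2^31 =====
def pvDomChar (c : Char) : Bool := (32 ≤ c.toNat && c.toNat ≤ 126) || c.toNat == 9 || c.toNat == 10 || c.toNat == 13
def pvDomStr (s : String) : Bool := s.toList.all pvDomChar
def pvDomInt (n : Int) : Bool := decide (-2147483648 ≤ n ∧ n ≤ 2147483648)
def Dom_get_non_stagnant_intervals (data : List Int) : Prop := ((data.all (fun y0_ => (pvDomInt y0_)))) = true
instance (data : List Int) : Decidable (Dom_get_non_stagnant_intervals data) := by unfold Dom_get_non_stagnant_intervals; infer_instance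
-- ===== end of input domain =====

-- B replaces A's stateful open/close scan by a two-phase build-then-group decomposition (same O(n) cost; objective: alternative).

-- ===== PORT A =====
-- loop body of A's for-loop (state: intervals so far, optional open start)
def pvStepA (data : List Int) (st : List (Int × Int) × Option Int) (i : Int) :
    List (Int × Int) × Option Int :=
  if PySem.List.pyGetD data i 0 > PySem.List.pyGetD data (i + 1) 0 then
    match st.2 with
    | none => (st.1, some i)
    | some _ => st
  else
    match st.2 with
    | some s => (st.1 ++ [(s, i)], none)
    | none => st

def get_non_stagnant_intervals (data : List Int) : List (Int × Int) :=
  let r := (PySem.List.pyRange 0 ((data.length : Int) - 1) 1).foldl (pvStepA data) ([], none)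
  match r.2 with
  | some s => r.1 ++ [(s, (data.length : Int) - 1)]
  | none => r.1

-- ===== PORT B =====
-- inner while loop of B: walk a run of consecutive descent indices, return (last index of run, rest)
def pvRunEnd (prev : Int) : List Int → Int × List Int
  | [] => (prev, [])
  | x :: xs => if x = prev + 1 then pvRunEnd x xs else (prev, x :: xs)

theorem pvRunEnd_len (prev : Int) (l : List Int) : (pvRunEnd prev l).2.length ≤ l.length := by
  induction l generalizing prev with
  | nil => simp [pvRunEnd]
  | cons x xs ih =>
    simp only [pvRunEnd]
    split
    · exact Nat.le_trans (ih x) (Nat.le_succ _)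
    · exact Nat.le_refl _

-- outer while loop of B: group the descent list into maximal consecutive runs
def pvGroup : List Int → List (Int × Int)
  | [] => []
  | x :: xs =>
    (x, (pvRunEnd x xs).1 + 1) :: pvGroup (pvRunEnd x xs).2
termination_by l => l.length
decreasing_by
  exact Nat.lt_succ_of_le (pvRunEnd_len x xs)

def get_non_stagnant_intervals_alt (data : List Int) : List (Int × Int) :=
  pvGroup ((PySem.List.pyRange 0 ((data.length : Int) - 1) 1).filter
    (fun i => decide (PySem.List.pyGetD data i 0 > PySem.List.pyGetD data (i + 1) 0)))

-- ===== PRECONDITION & SPEC =====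
def Spec_get_non_stagnant_intervals (data : List Int) (out : List (Int × Int)) : Prop := out = get_non_stagnant_intervals_alt data
instance (data : List Int) (out : List (Int × Int)) : Decidable (Spec_get_non_stagnant_intervals data out) := by unfold Spec_get_non_stagnant_intervals; infer_instance

-- ===== CLAIM (what is proved, stated in full; the proofs are below) =====
def Claim_equal_get_non_stagnant_intervals : Prop := ∀ (data : List Int), Dom_get_non_stagnant_intervals data → Spec_get_non_stagnant_intervals data (get_non_stagnant_intervals data)

-- ===== LEMMAS AND PROOFS =====

def pvFinish (e : Int) (r : List (Int × Int) × Option Int) : List (Int × Int) :=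
  match r.2 with
  | some s => r.1 ++ [(s, e)]
  | none => r.1

def pvFilt (data : List Int) (a b : Int) : List Int :=
  (PySem.List.pyRange a b 1).filter
    (fun i => decide (PySem.List.pyGetD data i 0 > PySem.List.pyGetD data (i + 1) 0))

theorem pvFilt_ge (data : List Int) (a b x : Int) (hx : x ∈ pvFilt data a b) : a ≤ x := by
  have := List.mem_filter.mp hx
  exact (PySem.List.mem_pyRange_one.mp this.1).1

-- Core invariant: the scan with closed state equals the grouped descent list; with an open
-- run started at s (whose last confirmed descent index is a-1) it equals s's finished run
-- followed by the grouping of the remaining descents.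
theorem pvBoth (n : Nat) : ∀ (data : List Int) (a b : Int), (b - a).toNat = n →
    (∀ acc, pvFinish b (List.foldl (pvStepA data) (acc, none) (PySem.List.pyRange a b 1))
        = acc ++ pvGroup (pvFilt data a b)) ∧
    (a ≤ b → ∀ acc (s : Int),
      pvFinish b (List.foldl (pvStepA data) (acc, some s) (PySem.List.pyRange a b 1))
        = acc ++ ((s, (pvRunEnd (a - 1) (pvFilt data a b)).1 + 1)
            :: pvGroup (pvRunEnd (a - 1) (pvFilt data a b)).2)) := by
  induction n with
  | zero =>
    intro data a b h
    have hba : b ≤ a := by omega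
    have hnil : PySem.List.pyRange a b 1 = [] := PySem.List.pyRange_one_eq_nil hba
    constructor
    · intro acc; simp [hnil, pvFinish, pvFilt, pvGroup]
    · intro hab acc s
      have : b = a := le_antisymm hba hab
      subst this
      simp [hnil, pvFinish, pvFilt, pvGroup, pvRunEnd]
  | succ n ih =>
    intro data a b h
    have hab : a < b := by omega
    have hcons : PySem.List.pyRange a b 1 = a :: PySem.List.pyRange (a + 1) b 1 :=
      PySem.List.pyRange_one_cons hab
    have hn : (b - (a + 1)).toNat = n := by omega
    have ihd := ih data (a + 1) b hn
    by_cases hd : PySem.List.pyGetD data a 0 > PySem.List.pyGetD data (a + 1) 0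
    · -- descent at a
      have hfilt : pvFilt data a b = a :: pvFilt data (a + 1) b := by
        simp [pvFilt, hcons, hd]
      constructor
      · intro acc
        rw [hcons]
        simp only [List.foldl_cons, pvStepA, if_pos hd]
        have := ihd.2 (by omega) acc a
        simp only [Int.add_sub_cancel] at this
        rw [this, hfilt, pvGroup]
      · intro _ acc s
        rw [hcons]
        simp only [List.foldl_cons, pvStepA, if_pos hd]
        have := ihd.2 (by omega) acc s
        simp only [Int.add_sub_cancel] at this
        rw [this, hfilt]
        have hr : pvRunEnd (a - 1) (a :: pvFilt data (a + 1) b)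
            = pvRunEnd a (pvFilt data (a + 1) b) := by
          simp [pvRunEnd]
        rw [hr]
    · -- no descent at a
      have hfilt : pvFilt data a b = pvFilt data (a + 1) b := by
        simp [pvFilt, hcons, hd]
      constructor
      · intro acc
        rw [hcons]
        simp only [List.foldl_cons, pvStepA, if_neg hd]
        rw [ihd.1 acc, hfilt]
      · intro _ acc s
        rw [hcons]
        simp only [List.foldl_cons, pvStepA, if_neg hd]
        rw [ihd.1 (acc ++ [(s, a)]), hfilt]
        have hr : pvRunEnd (a - 1) (pvFilt data (a + 1) b)
            = (a - 1, pvFilt data (a + 1) b) := by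
          cases hF : pvFilt data (a + 1) b with
          | nil => simp [pvRunEnd]
          | cons x xs =>
            have hx : a + 1 ≤ x := pvFilt_ge data (a + 1) b x (hF ▸ List.mem_cons_self ..)
            simp [pvRunEnd]
            omega
        rw [hr]
        simp

-- ===== VERDICT (by name: the statement is the Claim_ definition above) =====
theorem get_non_stagnant_intervals_spec : Claim_equal_get_non_stagnant_intervals := by
  intro data _
  show get_non_stagnant_intervals data = get_non_stagnant_intervals_alt data
  have h := (pvBoth (((data.length : Int) - 1) - 0).toNat data 0 ((data.length : Int) - 1) rfl).1 []
  simpa [get_non_stagnant_intervals, get_non_stagnant_intervals_alt, pvFinish, pvFilt] using h
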